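-- pv_equiv track=rewrite | github.com/leitwert-net/wumpus | src/wumpus/iputil.py | int_to_host
-- ===== SOURCE A (Python) =====
-- import math
--
-- FIXED_HOST_BYTES = 6
--
-- FIXED_HOST_VALUE_BITS = 16
--
-- FIXED_HOST_VALUE_CHARS = 2
--
-- FIXED_HOST_VALUE_OFFSET = 2**((FIXED_HOST_VALUE_CHARS - 1) * 4)
--
-- FIXED_HOST_VALUES = 2**(FIXED_HOST_VALUE_CHARS * 4) - FIXED_HOST_VALUE_OFFSET
--
-- def int_to_host(value):
--     """ Convert integer value to fixed-length IPv6 host.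
--     """
--     # Convert value to host part
--     host, n_bytes = 0, 0
--     while value > 0:
--         value, byte = divmod(value, FIXED_HOST_VALUES)
--         host += (byte + FIXED_HOST_VALUE_OFFSET) << (n_bytes * FIXED_HOST_VALUE_BITS)
--         n_bytes += 1
--
--     # Fill up to fixed length
--     for n_bytes in range(n_bytes, math.ceil(FIXED_HOST_BYTES / FIXED_HOST_VALUE_CHARS)):
--         host += FIXED_HOST_VALUE_OFFSET << (n_bytes * FIXED_HOST_VALUE_BITS)
--
--     # Return host integer
--     return host
-- ===== SOURCE B (Python) =====
-- import math
--
-- FIXED_HOST_BYTES = 6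
-- FIXED_HOST_VALUE_BITS = 16
-- FIXED_HOST_VALUE_CHARS = 2
-- FIXED_HOST_VALUE_OFFSET = 2**((FIXED_HOST_VALUE_CHARS - 1) * 4)
-- FIXED_HOST_VALUES = 2**(FIXED_HOST_VALUE_CHARS * 4) - FIXED_HOST_VALUE_OFFSET
--
--
-- def _pack(value, slots):
--     """ Horner-scheme recursion: the least-significant slot is emitted,
--     the rest is packed recursively and shifted up as a whole. """
--     if value > 0:
--         rest, digit = divmod(value, FIXED_HOST_VALUES)
--     elif slots > 0:
--         rest, digit = 0, 0
--     else:
--         return 0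
--     return (digit + FIXED_HOST_VALUE_OFFSET) + (_pack(rest, slots - 1) << FIXED_HOST_VALUE_BITS)
--
--
-- def int_to_host(value):
--     """ Convert integer value to fixed-length IPv6 host.
--     """
--     return _pack(value, math.ceil(FIXED_HOST_BYTES / FIXED_HOST_VALUE_CHARS))
-- ===== Notes on version B (the rewrite author's own statement) =====
-- stated objective: simpler
-- what changed: B is a single Horner-scheme recursion that emits the low slot and shifts the recursively packed rest up as a whole, with a countdown slot counter carrying the zero padding, replacing A's two sequential loops that track an explicit slot index and accumulate shifted terms.
import Mathlib
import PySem

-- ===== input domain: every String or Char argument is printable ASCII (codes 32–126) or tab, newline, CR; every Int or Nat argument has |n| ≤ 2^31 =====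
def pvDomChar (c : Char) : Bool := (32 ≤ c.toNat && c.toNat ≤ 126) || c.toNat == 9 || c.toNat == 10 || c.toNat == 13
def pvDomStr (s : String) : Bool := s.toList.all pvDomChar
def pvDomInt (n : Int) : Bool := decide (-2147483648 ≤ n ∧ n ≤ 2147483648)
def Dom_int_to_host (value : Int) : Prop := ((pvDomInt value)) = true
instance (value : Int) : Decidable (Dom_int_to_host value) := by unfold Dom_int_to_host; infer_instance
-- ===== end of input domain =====

-- B replaces A's two indexed accumulation loops by a single Horner-scheme recursion with a
-- countdown slot counter; objective: simpler.

-- ===== PORT A =====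
-- while value > 0: value, byte = divmod(value, 240); host += (byte+16) << (n_bytes*16); n_bytes += 1
def intToHostLoop (value host : Int) (nBytes : Nat) : Int × Nat :=
  if h : value > 0 then
    intToHostLoop (PySem.Int.floordiv value 240)
      (host + (PySem.Int.mod value 240 + 16) <<< (nBytes * 16)) (nBytes + 1)
  else (host, nBytes)
termination_by value.toNat
decreasing_by
  have := PySem.Int.floordiv_eq_ediv_of_pos (a := value) (b := 240) (by norm_num)
  omega

-- for n_bytes in range(n_bytes, 3): host += 16 << (n_bytes*16)   (ceil(6/2) = 3)
def intToHostFill (host : Int) (nBytes : Nat) : Int :=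
  if nBytes < 3 then intToHostFill (host + (16 : Int) <<< (nBytes * 16)) (nBytes + 1) else host
termination_by 3 - nBytes

def int_to_host (value : Int) : Int :=
  let p := intToHostLoop value 0 0
  intToHostFill p.1 p.2

-- ===== PORT B =====
-- _pack(value, slots): low slot first, rest packed recursively and shifted up as a whole
def altPack (value slots : Int) : Int :=
  if h : value > 0 then
    (PySem.Int.mod value 240 + 16) + altPack (PySem.Int.floordiv value 240) (slots - 1) <<< (16 : Nat)
  else if slots > 0 then
    ((0 : Int) + 16) + altPack 0 (slots - 1) <<< (16 : Nat)
  else 0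
termination_by value.toNat + slots.toNat
decreasing_by
  · have := PySem.Int.floordiv_eq_ediv_of_pos (a := value) (b := 240) (by norm_num)
    omega
  · omega

def int_to_host_alt (value : Int) : Int := altPack value 3

-- ===== PRECONDITION & SPEC =====
def Spec_int_to_host (value : Int) (out : Int) : Prop := out = int_to_host_alt value
instance (value : Int) (out : Int) : Decidable (Spec_int_to_host value out) := by unfold Spec_int_to_host; infer_instance

-- ===== CLAIM (what is proved, stated in full; the proofs are below) =====
def Claim_equal_int_to_host : Prop := ∀ (value : Int), Dom_int_to_host value → Spec_int_to_host value (int_to_host value)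

-- ===== LEMMAS AND PROOFS =====

-- proof-only helper: the raw base-240 digits of value, least significant first
def digs (value : Int) : List Int :=
  if h : value > 0 then PySem.Int.mod value 240 :: digs (PySem.Int.floordiv value 240) else []
termination_by value.toNat
decreasing_by
  have := PySem.Int.floordiv_eq_ediv_of_pos (a := value) (b := 240) (by norm_num)
  omega

-- packAux ds i = value of digits ds placed (offset 16) from 16-bit slot i upward
def packAux (ds : List Int) (i : Nat) : Int :=
  match ds with
  | [] => 0
  | d :: t => (d + 16) * 2 ^ (i * 16) + packAux t (i + 1)

theorem packAux_append (ds es : List Int) (i : Nat) :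
    packAux (ds ++ es) i = packAux ds i + packAux es (i + ds.length) := by
  induction ds generalizing i with
  | nil => simp [packAux]
  | cons d t ih => simp [packAux, ih, Nat.add_assoc, Nat.add_comm 1 t.length]; ring

theorem packAux_shift (ds : List Int) (i : Nat) :
    packAux ds (i + 1) = 2 ^ 16 * packAux ds i := by
  induction ds generalizing i with
  | nil => simp [packAux]
  | cons d t ih => simp [packAux, ih]; ring

theorem intToHostLoop_eq (value : Int) :
    ∀ (host : Int) (n : Nat),
      intToHostLoop value host n = (host + packAux (digs value) n, n + (digs value).length) := by
  fun_induction digs value with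
  | case1 v h ih =>
    intro host n
    rw [intToHostLoop, dif_pos h, ih]
    simp [packAux, Int.shiftLeft_eq, Nat.add_comm 1, Nat.add_assoc]
    ring
  | case2 v h =>
    intro host n
    rw [intToHostLoop, dif_neg h]
    simp [packAux]

theorem intToHostFill_eq (n : Nat) (host : Int) :
    intToHostFill host n = host + packAux (List.replicate (3 - n) 0) n := by
  fun_induction intToHostFill host n with
  | case1 h n hlt ih =>
    have hrep : (3 - n) = (3 - (n + 1)) + 1 := by omega
    rw [ih, hrep, List.replicate_succ]
    simp [packAux, Int.shiftLeft_eq]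
    ring
  | case2 h n hge =>
    have : 3 - n = 0 := by omega
    simp [this, packAux]

theorem altPack_eq (value slots : Int) :
    altPack value slots =
      packAux (digs value ++ List.replicate (slots - (digs value).length).toNat 0) 0 := by
  fun_induction altPack value slots with
  | case1 v s h ih =>
    rw [digs, dif_pos h]
    have hlen : ((s - 1 : Int) - (digs (PySem.Int.floordiv v 240)).length).toNat
        = (s - ((PySem.Int.mod v 240 :: digs (PySem.Int.floordiv v 240)).length : Int)).toNat := by
      simp; omega
    rw [ih, ← hlen]
    simp only [List.cons_append, packAux, packAux_shift]
    simp [Int.shiftLeft_eq]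
    ring
  | case2 v s h hs ih =>
    rw [digs, dif_neg h]
    have h0 : digs 0 = [] := by rw [digs]; simp
    rw [ih, h0]
    simp only [List.nil_append, List.length_nil, Nat.cast_zero, Int.sub_zero]
    have hrep : s.toNat = (s - 1).toNat + 1 := by omega
    rw [hrep, List.replicate_succ]
    simp only [packAux, packAux_shift]
    simp [Int.shiftLeft_eq]
    ring
  | case3 v s h hs =>
    rw [digs, dif_neg h]
    have h0 : ((s : Int) - ((([] : List Int).length : Nat) : Int)).toNat = 0 := by simp; omega
    rw [List.nil_append, h0]
    simp [packAux]

-- ===== VERDICT (by name: the statement is the Claim_ definition above) =====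
theorem int_to_host_spec : Claim_equal_int_to_host := by
  intro value _
  unfold Spec_int_to_host int_to_host int_to_host_alt
  rw [altPack_eq, intToHostLoop_eq, intToHostFill_eq, packAux_append]
  have : ((3 : Int) - ((digs value).length : Int)).toNat = 3 - (digs value).length := by omega
  simp [this]
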